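-- pv_equiv track=rewrite | github.com/stars869/lambda-calculus-interpreter-in-python | my_parser.py | sepBlocks
-- ===== SOURCE A (Python) =====
-- def sepBlocks(s: str) -> list[str]:
--     lines = s.split('\n')
--     blocks = []
--     currentBlock = []
--
--     for line in lines:
--         if not line:
--             continue
--         if not line[0].isspace():
--             blocks.append("".join(currentBlock))
--             currentBlock = [line,]
--         else:
--             currentBlock.append(line)
--
--     blocks.append("".join(currentBlock))
--
--     blocks = list(filter(lambda x: x, blocks))
--     blocks = list(filter(lambda x: not x.isspace(), blocks))
--
--     return blocks
-- ===== SOURCE B (Python) =====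
-- def sepBlocks(s: str) -> list[str]:
--     # two-pointer/takeWhile grouping: find each block's extent, slice it out, join once
--     kept = [ln for ln in s.split('\n') if ln]
--
--     def leads_space(ln):
--         return ln[0].isspace()
--
--     i = 0
--     while i < len(kept) and leads_space(kept[i]):
--         i += 1
--     blocks = ["".join(kept[:i])]
--     rest = kept[i:]
--     while rest:
--         h, t = rest[0], rest[1:]
--         j = 0
--         while j < len(t) and leads_space(t[j]):
--             j += 1
--         blocks.append(h + "".join(t[:j]))
--         rest = t[j:]
--     return [b for b in blocks if b and not b.isspace()]
-- ===== Notes on version B (the rewrite author's own statement) =====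
-- stated objective: alternative
-- what changed: Replaced A's single-pass accumulator fold (blocks/currentBlock state mutated per line) with a two-pointer takeWhile/dropWhile grouping that slices each block's run of indented lines out of the non-empty-line list and joins it once, with one combined final filter.
import Mathlib
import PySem

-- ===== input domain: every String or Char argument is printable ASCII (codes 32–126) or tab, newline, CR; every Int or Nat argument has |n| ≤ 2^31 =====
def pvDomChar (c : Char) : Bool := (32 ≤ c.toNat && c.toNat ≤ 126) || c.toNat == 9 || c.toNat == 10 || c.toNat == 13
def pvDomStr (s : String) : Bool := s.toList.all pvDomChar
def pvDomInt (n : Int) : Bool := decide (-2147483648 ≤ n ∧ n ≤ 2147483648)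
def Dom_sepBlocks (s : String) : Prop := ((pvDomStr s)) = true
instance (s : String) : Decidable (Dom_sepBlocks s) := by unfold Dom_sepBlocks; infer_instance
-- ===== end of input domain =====

-- B regroups the lines with takeWhile/dropWhile slicing instead of A's accumulator fold; same result, same cost.

-- ===== PORT A =====
-- one loop step of A: skip empty lines, start a new block on a non-space-led line, else extend
def sepBlocksStep (st : List (List Char) × List (List Char)) (line : List Char) :
    List (List Char) × List (List Char) :=
  match line with
  | [] => st
  | c :: _ =>
    if !(PySem.Chars.isspace c) then (st.1 ++ [PySem.Chars.join [] st.2], [line])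
    else (st.1, st.2 ++ [line])

def sepBlocks (s : String) : List String :=
  let lines := PySem.Chars.splitOn s.toList ['\n']
  let st := lines.foldl sepBlocksStep ([], [])
  let blocks := st.1 ++ [PySem.Chars.join [] st.2]
  let blocks := blocks.filter (fun x => !x.isEmpty)
  let blocks := blocks.filter (fun x => !(PySem.Chars.strIsspace x))
  blocks.map String.mk

-- ===== PORT B =====
-- ln[0].isspace() on a (never-empty in B) kept line
def spaceLed (ln : List Char) : Bool :=
  match ln with
  | [] => false
  | c :: _ => PySem.Chars.isspace c

-- B's inner while-loop pair: take the run of indented lines after the header, recurse on the rest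
def buildBlocks (ls : List (List Char)) : List (List Char) :=
  match ls with
  | [] => []
  | h :: t =>
      (h ++ PySem.Chars.join [] (t.takeWhile spaceLed)) :: buildBlocks (t.dropWhile spaceLed)
termination_by ls.length
decreasing_by
  simpa using Nat.lt_succ_of_le (List.length_dropWhile_le spaceLed t)

def sepBlocks_alt (s : String) : List String :=
  let kept := (PySem.Chars.splitOn s.toList ['\n']).filter (fun ln => !ln.isEmpty)
  let lead := PySem.Chars.join [] (kept.takeWhile spaceLed)
  let blocks := lead :: buildBlocks (kept.dropWhile spaceLed)
  (blocks.filter (fun b => !b.isEmpty && !(PySem.Chars.strIsspace b))).map String.mk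

-- ===== PRECONDITION & SPEC =====
def Spec_sepBlocks (s : String) (out : List String) : Prop := out = sepBlocks_alt s
instance (s : String) (out : List String) : Decidable (Spec_sepBlocks s out) := by unfold Spec_sepBlocks; infer_instance

-- ===== CLAIM (what is proved, stated in full; the proofs are below) =====
def Claim_equal_sepBlocks : Prop := ∀ (s : String), Dom_sepBlocks s → Spec_sepBlocks s (sepBlocks s)

-- ===== LEMMAS AND PROOFS =====

lemma join_nil_cons (x : List Char) (xs : List (List Char)) :
    PySem.Chars.join [] (x :: xs) = x ++ PySem.Chars.join [] xs := by
  cases xs <;> simp [PySem.Chars.join, List.intercalate]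

lemma join_nil_append (xs ys : List (List Char)) :
    PySem.Chars.join [] (xs ++ ys) = PySem.Chars.join [] xs ++ PySem.Chars.join [] ys := by
  induction xs with
  | nil => simp [PySem.Chars.join, List.intercalate]
  | cons a t ih => simp [join_nil_cons, ih]

-- A's fold skips empty lines, so folding over the filtered list is the same
lemma foldl_step_filter (L : List (List Char)) (st : List (List Char) × List (List Char)) :
    L.foldl sepBlocksStep st = (L.filter (fun ln => !ln.isEmpty)).foldl sepBlocksStep st := by
  induction L generalizing st with
  | nil => rfl
  | cons l t ih =>
    cases l with
    | nil => simpa [sepBlocksStep] using ih st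
    | cons c cs => simp [List.filter, ih]

-- the core invariant: A's fold-and-flush equals B's takeWhile/dropWhile grouping
lemma fold_eq_build (L : List (List Char)) (hL : ∀ l ∈ L, l ≠ ([] : List Char))
    (bs cur : List (List Char)) :
    (L.foldl sepBlocksStep (bs, cur)).1 ++ [PySem.Chars.join [] (L.foldl sepBlocksStep (bs, cur)).2]
      = bs ++ (PySem.Chars.join [] cur ++ PySem.Chars.join [] (L.takeWhile spaceLed))
          :: buildBlocks (L.dropWhile spaceLed) := by
  induction L generalizing bs cur with
  | nil => simp [PySem.Chars.join, List.intercalate, buildBlocks]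
  | cons l t ih =>
    obtain ⟨c, cs, rfl⟩ : ∃ c cs, l = c :: cs := by
      cases l with
      | nil => exact absurd rfl (hL [] (by simp))
      | cons c cs => exact ⟨c, cs, rfl⟩
    have ht : ∀ l ∈ t, l ≠ ([] : List Char) := fun l hl => hL l (by simp [hl])
    cases hc : PySem.Chars.isspace c with
    | true =>
      rw [List.foldl_cons]
      simp only [sepBlocksStep, hc, Bool.not_true, Bool.false_eq_true, if_false]
      rw [ih ht bs (cur ++ [c :: cs])]
      simp [spaceLed, hc, join_nil_append, join_nil_cons]
    | false =>
      rw [List.foldl_cons]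
      simp only [sepBlocksStep, hc, Bool.not_false, if_true]
      rw [ih ht (bs ++ [PySem.Chars.join [] cur]) [c :: cs]]
      simp [spaceLed, hc, buildBlocks, PySem.Chars.join, List.intercalate]

-- ===== VERDICT (by name: the statement is the Claim_ definition above) =====
theorem sepBlocks_spec : Claim_equal_sepBlocks := by
  intro s _
  have hkept : ∀ l ∈ (PySem.Chars.splitOn s.toList ['\n']).filter (fun ln => !ln.isEmpty),
      l ≠ ([] : List Char) := by
    intro l hl
    simpa using List.of_mem_filter hl
  show sepBlocks s = sepBlocks_alt s
  simp only [sepBlocks, sepBlocks_alt]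
  rw [foldl_step_filter]
  rw [fold_eq_build _ hkept [] []]
  simp only [List.nil_append, PySem.Chars.join_nil]
  rw [List.filter_filter]
  congr 1
  apply List.filter_congr
  intro x _
  simp [Bool.and_comm]
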